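-- pv_equiv track=rewrite | github.com/marbfar/bp-data-generator | bp-data-generator.py | generate_ranges
-- ===== SOURCE A (Python) =====
-- def generate_ranges(starting_number, range_size, total_numbers):
--     ranges = []
--     current_number = starting_number
--     end_number = starting_number + total_numbers - 1
--     while current_number <= end_number:
--         range_from = current_number
--         range_to = min(current_number + range_size - 1, end_number)
--         ranges.append((range_from, range_to))
--         current_number = range_to + 1  # Move to the next range
--     return ranges
--
-- starting_number = 400001
--
-- range_size = 10
--
-- total_numbers = 800
-- ===== SOURCE B (Python) =====
-- def generate_ranges(starting_number, range_size, total_numbers):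
--     if total_numbers <= 0:
--         return []
--     end_number = starting_number + total_numbers - 1
--     # Stage 1: compute all chunk boundary cut points (starts of full chunks).
--     full = total_numbers // range_size
--     cuts = [starting_number + k * range_size for k in range(full + 1)]
--     if cuts[-1] <= end_number:
--         cuts.append(starting_number + total_numbers)
--     # Stage 2: pair adjacent cut points: each chunk is [cut, next_cut - 1].
--     return list(zip(cuts, (c - 1 for c in cuts[1:])))
-- ===== Notes on version B (the rewrite author's own statement) =====
-- stated objective: alternative
-- what changed: Replaces A's single cursor-advancing while-loop with a staged boundary-list construction: first compute all chunk cut points (starts of the total_numbers//range_size full chunks plus a closing boundary), then zip adjacent cut points into (from, to) pairs.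
import Mathlib
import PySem

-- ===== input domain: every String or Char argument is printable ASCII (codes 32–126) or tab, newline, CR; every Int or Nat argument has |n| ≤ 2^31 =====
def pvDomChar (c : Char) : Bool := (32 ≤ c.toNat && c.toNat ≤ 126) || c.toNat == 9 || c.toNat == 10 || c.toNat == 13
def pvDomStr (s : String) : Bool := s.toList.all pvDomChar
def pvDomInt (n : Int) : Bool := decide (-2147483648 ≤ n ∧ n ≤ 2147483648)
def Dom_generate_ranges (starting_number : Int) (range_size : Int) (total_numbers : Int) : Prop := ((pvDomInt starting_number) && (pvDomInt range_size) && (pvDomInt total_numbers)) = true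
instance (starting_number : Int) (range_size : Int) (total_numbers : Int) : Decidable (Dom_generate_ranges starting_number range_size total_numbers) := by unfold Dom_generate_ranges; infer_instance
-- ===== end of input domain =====

-- B replaces A's cursor-advancing while-loop by a staged construction: it first builds the
-- list of chunk boundary cut points, then zips adjacent cut points into (from, to) pairs.

-- ===== PORT A =====
-- A's while-loop; the fuel only bounds the iteration count (each iteration advances
-- current_number by at least 1 under Pre_, so total_numbers.toNat steps always suffice).
def pvLoopA (range_size end_number : Int) : Nat → Int → List (Int × Int) → List (Int × Int)
  | 0, _, acc => acc
  | fuel + 1, current, acc =>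
    if current ≤ end_number then
      let range_to := min (current + range_size - 1) end_number
      pvLoopA range_size end_number fuel (range_to + 1) (acc ++ [(current, range_to)])
    else acc

def generate_ranges (starting_number : Int) (range_size : Int) (total_numbers : Int) : List (Int × Int) :=
  let end_number := starting_number + total_numbers - 1
  pvLoopA range_size end_number total_numbers.toNat starting_number []

-- ===== PORT B =====
def generate_ranges_alt (starting_number : Int) (range_size : Int) (total_numbers : Int) : List (Int × Int) :=
  if total_numbers ≤ 0 then []
  else
    let end_number := starting_number + total_numbers - 1
    let full := PySem.Int.floordiv total_numbers range_size
    let cuts := (PySem.List.pyRange 0 (full + 1) 1).map (fun k => starting_number + k * range_size)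
    let cuts2 :=
      match PySem.List.pyGet? cuts (-1) with        -- cuts[-1]
      | some last => if last ≤ end_number then cuts ++ [starting_number + total_numbers] else cuts
      | none => cuts                                 -- unreachable under Pre_ (Python raises IndexError)
    cuts2.zip ((PySem.List.slice cuts2 (some 1) none).map (fun c => c - 1))   -- zip(cuts, (c-1 for c in cuts[1:]))

-- ===== PRECONDITION & SPEC =====
-- Pre_ excludes range_size ≤ 0 with total_numbers ≥ 1, on which A's while-loop never
-- terminates (current_number never advances); A returns normally exactly on Pre_.
def Pre_generate_ranges (starting_number : Int) (range_size : Int) (total_numbers : Int) : Prop :=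
  1 ≤ range_size ∨ total_numbers ≤ 0
instance (starting_number : Int) (range_size : Int) (total_numbers : Int) : Decidable (Pre_generate_ranges starting_number range_size total_numbers) := by unfold Pre_generate_ranges; infer_instance

def pvWitness_generate_ranges : Int × Int × Int := (400001, 10, 85)

def Spec_generate_ranges (starting_number : Int) (range_size : Int) (total_numbers : Int) (out : List (Int × Int)) : Prop := out = generate_ranges_alt starting_number range_size total_numbers
instance (starting_number : Int) (range_size : Int) (total_numbers : Int) (out : List (Int × Int)) : Decidable (Spec_generate_ranges starting_number range_size total_numbers out) := by unfold Spec_generate_ranges; infer_instance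

-- ===== CLAIM (what is proved, stated in full; the proofs are below) =====
def Claim_equal_generate_ranges : Prop := ∀ (starting_number : Int) (range_size : Int) (total_numbers : Int), Dom_generate_ranges starting_number range_size total_numbers → Pre_generate_ranges starting_number range_size total_numbers → Spec_generate_ranges starting_number range_size total_numbers (generate_ranges starting_number range_size total_numbers)

-- ===== LEMMAS AND PROOFS =====

-- The common chunk shape both programs produce: n chunks of width rs starting at cur,
-- the last one clamped to e.
def pvChunks (rs e : Int) : Int → Nat → List (Int × Int)
  | _, 0 => []
  | cur, n + 1 => (cur, min (cur + rs - 1) e) :: pvChunks rs e (cur + rs) n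

-- number of chunks covering span x with width rs: ceil(x/rs), clamped at 0
def pvCeilNat (x rs : Int) : Nat := (PySem.Int.floordiv (x + rs - 1) rs).toNat

theorem pvCeilNat_zero (x rs : Int) (hrs : 1 ≤ rs) (hx : x ≤ 0) : pvCeilNat x rs = 0 := by
  unfold pvCeilNat
  have h : PySem.Int.floordiv (x + rs - 1) rs < 1 := by
    rw [PySem.Int.floordiv_lt_iff_lt_mul (by omega)]
    omega
  omega

theorem pvCeilNat_succ (x rs : Int) (hrs : 1 ≤ rs) (hx : 1 ≤ x) :
    pvCeilNat x rs = pvCeilNat (x - rs) rs + 1 := by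
  unfold pvCeilNat
  have h1 : PySem.Int.floordiv (x + rs - 1) rs = PySem.Int.floordiv (x - rs + rs - 1) rs + 1 := by
    rw [PySem.Int.floordiv_eq_ediv_of_pos (by omega : (0:Int) < rs),
        PySem.Int.floordiv_eq_ediv_of_pos (by omega : (0:Int) < rs)]
    have h : x + rs - 1 = (x - rs + rs - 1) + 1 * rs := by ring
    rw [h, Int.add_mul_ediv_right _ _ (by omega : rs ≠ 0)]
  have h2 : 0 ≤ PySem.Int.floordiv (x - rs + rs - 1) rs := by
    rw [PySem.Int.floordiv_eq_ediv_of_pos (by omega : (0:Int) < rs)]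
    exact Int.ediv_nonneg (by omega) (by omega)
  omega

theorem pvChunks_succ (rs e cur : Int) (n : Nat) :
    pvChunks rs e cur (n + 1) = (cur, min (cur + rs - 1) e) :: pvChunks rs e (cur + rs) n := rfl

-- A's loop computes pvChunks, provided the fuel covers the remaining span
theorem pvLoopA_eq_chunks (rs e : Int) (hrs : 1 ≤ rs) :
    ∀ (fuel : Nat) (cur : Int) (acc : List (Int × Int)), e - cur + 1 ≤ (fuel : Int) →
      pvLoopA rs e fuel cur acc = acc ++ pvChunks rs e cur (pvCeilNat (e - cur + 1) rs) := by
  intro fuel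
  induction fuel with
  | zero =>
    intro cur acc hf
    rw [pvCeilNat_zero _ _ hrs (by exact_mod_cast hf)]
    simp [pvLoopA, pvChunks]
  | succ n ih =>
    intro cur acc hf
    by_cases hle : cur ≤ e
    · simp only [pvLoopA, if_pos hle]
      rw [ih (min (cur + rs - 1) e + 1) _ (by
        by_cases h : cur + rs - 1 ≤ e
        · rw [min_eq_left h]; push_cast at hf ⊢; omega
        · rw [min_eq_right (by omega)]; omega)]
      rw [List.append_assoc]
      congr 1
      rw [pvCeilNat_succ (e - cur + 1) rs hrs (by omega), pvChunks_succ, List.singleton_append]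
      by_cases hlast : cur + rs - 1 ≤ e
      · rw [min_eq_left hlast]
        have h1 : e - (cur + rs - 1 + 1) + 1 = e - cur + 1 - rs := by ring
        rw [h1, show cur + rs - 1 + 1 = cur + rs from by ring]
      · rw [min_eq_right (by omega)]
        rw [pvCeilNat_zero (e - (e + 1) + 1) rs hrs (by omega),
            pvCeilNat_zero (e - cur + 1 - rs) rs hrs (by omega)]
        rfl
    · rw [pvCeilNat_zero _ _ hrs (by omega)]
      simp [pvLoopA, pvChunks, hle]

-- ---- B side: the cut-point list and its adjacent-pair zipping ----

-- n+1 cut points s, s+rs, …, s+n*rs (the starts of n full chunks plus the closing boundary)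
def pvCuts (rs : Int) : Int → Nat → List Int
  | s, 0 => [s]
  | s, n + 1 => s :: pvCuts rs (s + rs) n

theorem pvCuts_cons (rs s : Int) (n : Nat) :
    pvCuts rs s n = s :: (pvCuts rs s n).tail := by cases n <;> rfl

theorem pvCuts_getLast? (rs : Int) : ∀ (n : Nat) (s : Int),
    (pvCuts rs s n).getLast? = some (s + n * rs) := by
  intro n
  induction n with
  | zero => intro s; simp [pvCuts]
  | succ m ih =>
    intro s
    rw [show pvCuts rs s (m + 1) = s :: pvCuts rs (s + rs) m from rfl,
        List.getLast?_cons, ih (s + rs)]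
    simp only [Option.getD_some, Option.some.injEq]
    push_cast
    ring

-- the indexed comprehension of B's stage 1 builds exactly pvCuts
theorem pvMapRange_eq_cuts (rs : Int) : ∀ (n : Nat) (s : Int),
    (List.range (n + 1)).map (fun (k : Nat) => s + (k : Int) * rs) = pvCuts rs s n := by
  intro n
  induction n with
  | zero => intro s; simp [pvCuts]
  | succ m ih =>
    intro s
    rw [List.range_succ_eq_map, List.map_cons, List.map_map,
        show pvCuts rs s (m + 1) = s :: pvCuts rs (s + rs) m from rfl]
    congr 1
    · norm_num
    · rw [← ih (s + rs)]
      apply List.map_congr_left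
      intro k _
      simp only [Function.comp]
      push_cast
      ring

-- zipping a cons with its tail-mapped shifts pairs off the two heads
theorem pvZip_cons_head (s c : Int) (t : List Int) (f : Int → Int) :
    ((s :: c :: t).zip ((c :: t).map f)) = (s, f c) :: ((c :: t).zip (t.map f)) := rfl

-- exact fit: the last cut is e+1 itself, no extra boundary appended
theorem pvZip_exact (rs e : Int) (hrs : 1 ≤ rs) :
    ∀ (n : Nat) (s : Int), s + n * rs = e + 1 →
      (pvCuts rs s n).zip ((pvCuts rs s n).tail.map (fun c => c - 1)) = pvChunks rs e s n := by
  intro n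
  induction n with
  | zero => intro s _; simp [pvCuts, pvChunks]
  | succ m ih =>
    intro s hsum
    have hm : (0 : Int) ≤ (m : Int) * rs :=
      mul_nonneg (Int.natCast_nonneg m) (by omega)
    have hsum' : (s + rs) + (m : Int) * rs = e + 1 := by push_cast at hsum; linarith
    have ih' := ih (s + rs) hsum'
    rw [pvCuts_cons rs (s + rs) m] at ih'
    simp only [List.tail_cons] at ih'
    rw [show pvCuts rs s (m + 1) = s :: pvCuts rs (s + rs) m from rfl,
        pvCuts_cons rs (s + rs) m]
    simp only [List.tail_cons]
    rw [pvZip_cons_head, ih', pvChunks_succ]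
    congr 2
    rw [min_eq_left (by linarith)]

-- partial last chunk: an extra closing boundary e+1 is appended after the n full cuts
theorem pvZip_app (rs e : Int) (hrs : 1 ≤ rs) :
    ∀ (n : Nat) (s : Int), s + n * rs ≤ e → e + 1 < s + n * rs + rs →
      (pvCuts rs s n ++ [e + 1]).zip ((pvCuts rs s n ++ [e + 1]).tail.map (fun c => c - 1))
        = pvChunks rs e s (n + 1) := by
  intro n
  induction n with
  | zero =>
    intro s h1 h2
    simp only [Nat.cast_zero, zero_mul, add_zero] at h1 h2
    show [(s, e + 1 - 1)] = pvChunks rs e s 1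
    rw [show pvChunks rs e s 1 = [(s, min (s + rs - 1) e)] from rfl, min_eq_right (by omega)]
    norm_num
  | succ m ih =>
    intro s h1 h2
    have hm : (0 : Int) ≤ (m : Int) * rs :=
      mul_nonneg (Int.natCast_nonneg m) (by omega)
    have h1' : (s + rs) + (m : Int) * rs ≤ e := by push_cast at h1; linarith
    have h2' : e + 1 < (s + rs) + (m : Int) * rs + rs := by push_cast at h2; linarith
    have ih' := ih (s + rs) h1' h2'
    rw [pvCuts_cons rs (s + rs) m] at ih'
    simp only [List.cons_append, List.tail_cons] at ih'
    rw [show pvCuts rs s (m + 1) = s :: pvCuts rs (s + rs) m from rfl,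
        pvCuts_cons rs (s + rs) m]
    simp only [List.cons_append, List.tail_cons]
    rw [pvZip_cons_head, ih', pvChunks_succ]
    congr 2
    rw [min_eq_left (by linarith)]

-- B computes pvChunks with the ceiling chunk count
theorem pvAlt_eq_chunks (s rs tn : Int) (hrs : 1 ≤ rs) (htn : 0 < tn) :
    generate_ranges_alt s rs tn = pvChunks rs (s + tn - 1) s (pvCeilNat tn rs) := by
  unfold generate_ranges_alt
  rw [if_neg (by omega)]
  have hfull : 0 ≤ PySem.Int.floordiv tn rs := by
    rw [PySem.Int.floordiv_eq_ediv_of_pos (by omega)]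
    exact Int.ediv_nonneg (by omega) (by omega)
  set full := PySem.Int.floordiv tn rs with hfulldef
  obtain ⟨hlo, hhi⟩ := (PySem.Int.floordiv_eq_iff_of_pos (by omega : (0:Int) < rs)).mp hfulldef.symm
  have hhi' : tn < full * rs + rs := by nlinarith [hhi]
  -- the comprehension is pvCuts
  have hcuts : (PySem.List.pyRange 0 (full + 1) 1).map (fun k => s + k * rs)
      = pvCuts rs s full.toNat := by
    have hn : (full + 1 - 0).toNat = full.toNat + 1 := by omega
    rw [PySem.List.pyRange_one, hn, ← pvMapRange_eq_cuts rs full.toNat s, List.map_map]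
    apply List.map_congr_left
    intro k _
    simp only [Function.comp]
    norm_num
  simp only [hcuts]
  -- cuts[-1] = s + full*rs
  have hlast : PySem.List.pyGet? (pvCuts rs s full.toNat) (-1)
      = some (s + full * rs) := by
    rw [PySem.List.pyGet?_neg_one, pvCuts_getLast? rs full.toNat s]
    have hfn : ((full.toNat : Int)) = full := by omega
    rw [hfn]
  rw [hlast]
  simp only [PySem.List.slice_from_one]
  by_cases happ : s + full * rs ≤ s + tn - 1
  · -- partial last chunk: boundary appended; count = full + 1
    rw [if_pos happ]
    have hcount : pvCeilNat tn rs = full.toNat + 1 := by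
      unfold pvCeilNat
      have : PySem.Int.floordiv (tn + rs - 1) rs = full + 1 := by
        rw [PySem.Int.floordiv_eq_iff_of_pos (by omega : (0:Int) < rs)]
        constructor
        · nlinarith
        · nlinarith
      rw [this]; omega
    rw [hcount]
    have hfn : ((full.toNat : Int)) = full := by omega
    have key := pvZip_app rs (s + tn - 1) hrs full.toNat s
      (by rw [hfn]; linarith) (by rw [hfn]; linarith [hhi'])
    rw [show s + tn - 1 + 1 = s + tn from by ring] at key
    exact key
  · -- exact fit: full*rs = tn; count = full
    rw [if_neg happ]
    rw [not_le] at happ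
    have heq : full * rs = tn := by linarith
    have hcount : pvCeilNat tn rs = full.toNat := by
      unfold pvCeilNat
      have : PySem.Int.floordiv (tn + rs - 1) rs = full := by
        rw [PySem.Int.floordiv_eq_iff_of_pos (by omega : (0:Int) < rs)]
        constructor
        · nlinarith
        · nlinarith
      rw [this]
    rw [hcount]
    have hfn : ((full.toNat : Int)) = full := by omega
    exact pvZip_exact rs (s + tn - 1) hrs full.toNat s (by rw [hfn]; linarith)

-- ===== VERDICT =====
theorem generate_ranges_spec : Claim_equal_generate_ranges := by
  intro s rs tn _hdom hpre
  unfold Spec_generate_ranges generate_ranges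
  by_cases htn : tn ≤ 0
  · have h0 : tn.toNat = 0 := by omega
    rw [h0]
    simp [pvLoopA, generate_ranges_alt, htn]
  · have hrs : 1 ≤ rs := by
      rcases hpre with h | h
      · exact h
      · omega
    rw [pvLoopA_eq_chunks rs (s + tn - 1) hrs tn.toNat s [] (by omega)]
    rw [pvAlt_eq_chunks s rs tn hrs (by omega)]
    have harg : s + tn - 1 - s + 1 = tn := by ring
    rw [List.nil_append, harg]
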